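-- pv_equiv track=rewrite | github.com/tiago-falves/FPRO-Python | Testes/Miniteste 2/Estudo/PE2/PE2_3.py | exactly
-- ===== SOURCE A (Python) =====
-- def exactly(s):
--     k=0
--     resultado=()
--     for i in range(len(s)-1):
--         if s[i] in "0123456789":
--             for j in range(i+1,len(s)):
--                 if s[j]=="?":
--                     k+=1
--                 if s[j] in "0123456789":
--                     if int(s[j])+int(s[i])==0:
--                         resultado+=(s[i]+s[j],)
--                         break
--                     else:
--                         return "The sequence {} is NOT OK with first violation with pair: {}".format(s,(s[i]+s[j],))
--     return "The sequence {} is OK with the pairs: {}".format(s,resultado)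
-- ===== SOURCE B (Python) =====
-- def exactly(s):
--     digits = [c for c in s if c in "0123456789"]
--     pairs = []
--     for a, b in zip(digits, digits[1:]):
--         if int(a) + int(b) == 0:
--             pairs.append(a + b)
--         else:
--             return "The sequence {} is NOT OK with first violation with pair: {}".format(s, (a + b,))
--     return "The sequence {} is OK with the pairs: {}".format(s, tuple(pairs))
-- ===== Notes on version B (the rewrite author's own statement) =====
-- stated objective: simpler
-- what changed: Replaces the index-driven outer loop over all positions with a nested scan-for-next-digit inner loop by one filter pass extracting the digits and a single walk over adjacent digit pairs.
import Mathlib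
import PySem

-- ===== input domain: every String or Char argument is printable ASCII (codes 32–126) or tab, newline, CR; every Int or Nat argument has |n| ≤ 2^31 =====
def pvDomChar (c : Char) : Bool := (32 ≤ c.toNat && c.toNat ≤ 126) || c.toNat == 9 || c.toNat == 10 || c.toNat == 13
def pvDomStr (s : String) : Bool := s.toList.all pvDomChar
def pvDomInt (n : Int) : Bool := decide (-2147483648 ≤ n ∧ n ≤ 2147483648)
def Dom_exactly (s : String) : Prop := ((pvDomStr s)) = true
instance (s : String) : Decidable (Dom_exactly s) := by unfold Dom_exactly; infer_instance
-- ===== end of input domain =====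

-- B replaces A's index-driven nested scans by one filter pass over the digits and a
-- single walk over adjacent digit pairs (objective: simpler; no asymptotic change).

-- shared message builders: both Pythons build their strings with the same two
-- "…".format(s, <tuple of pair-strings>) calls, so both ports share these helpers.
-- Python's repr of a tuple of simple digit strings (no escaping needed there):
def pyTupleRepr (xs : List String) : String :=
  match xs with
  | [] => "()"
  | [x] => "('" ++ x ++ "',)"
  | xs => "(" ++ String.intercalate ", " (xs.map (fun y => "'" ++ y ++ "'")) ++ ")"

def okMsg (s : String) (res : List String) : String :=
  "The sequence " ++ s ++ " is OK with the pairs: " ++ pyTupleRepr res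

def notOkMsg (s : String) (p : String) : String :=
  "The sequence " ++ s ++ " is NOT OK with first violation with pair: " ++ pyTupleRepr [p]

-- ===== PORT A =====
-- `c in "0123456789"` on a single character = membership of that char in the digits
def isDig (c : Char) : Bool := ("0123456789".toList).contains c

-- outcome of A's inner j-loop: fell through / appended a pair and broke / violation return
inductive InnerRes where
  | nofind : InnerRes
  | found : String → InnerRes
  | viol : String → InnerRes
deriving DecidableEq, Repr

-- A's inner loop `for j in range(i+1, len(s))`, fuel = len - j.
-- (Python's counter k is incremented on '?' but never read anywhere; it is omitted.)
def innerA (cs : List Char) (ci : Char) : Nat → Nat → InnerRes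
  | 0, _ => .nofind
  | fuel + 1, j =>
    let cj := cs.getD j ' '
    if isDig cj then
      if ((cj.toNat : Int) - 48) + ((ci.toNat : Int) - 48) == 0 then .found (String.ofList [ci, cj])
      else .viol (String.ofList [ci, cj])
    else innerA cs ci fuel (j + 1)

-- A's outer loop `for i in range(len(s)-1)`, fuel = (len-1) - i, carrying resultado
def outerA (s : String) (cs : List Char) : Nat → Nat → List String → String
  | 0, _, res => okMsg s res
  | fuel + 1, i, res =>
    let ci := cs.getD i ' '
    if isDig ci then
      match innerA cs ci (cs.length - (i + 1)) (i + 1) with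
      | .nofind => outerA s cs fuel (i + 1) res
      | .found p => outerA s cs fuel (i + 1) (res ++ [p])
      | .viol p => notOkMsg s p
    else outerA s cs fuel (i + 1) res

def exactly (s : String) : String :=
  let cs := s.toList
  outerA s cs (cs.length - 1) 0 []

-- ===== PORT B =====
-- walk over adjacent pairs of the digit list (Source B's zip(digits, digits[1:]) loop)
def pairScanB (s : String) : List Char → List String → String
  | a :: b :: rest, pairs =>
    if ((a.toNat : Int) - 48) + ((b.toNat : Int) - 48) == 0 then
      pairScanB s (b :: rest) (pairs ++ [String.ofList [a, b]])
    else notOkMsg s (String.ofList [a, b])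
  | _, pairs => okMsg s pairs

def exactly_alt (s : String) : String :=
  pairScanB s (s.toList.filter isDig) []

-- ===== PRECONDITION & SPEC =====
def Spec_exactly (s : String) (out : String) : Prop := out = exactly_alt s
instance (s : String) (out : String) : Decidable (Spec_exactly s out) := by unfold Spec_exactly; infer_instance

-- ===== CLAIM (what is proved, stated in full; the proofs are below) =====
def Claim_equal_exactly : Prop := ∀ (s : String), Dom_exactly s → Spec_exactly s (exactly s)

-- ===== LEMMAS AND PROOFS =====

-- what A's inner loop computes: decided by the first digit of the suffix
def mkInner (ci : Char) : List Char → InnerRes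
  | [] => .nofind
  | b :: _ =>
    if ((b.toNat : Int) - 48) + ((ci.toNat : Int) - 48) == 0 then InnerRes.found (String.ofList [ci, b])
    else InnerRes.viol (String.ofList [ci, b])

lemma drop_cons_getD (cs : List Char) (i : Nat) (h : i < cs.length) :
    cs.drop i = cs.getD i ' ' :: cs.drop (i + 1) := by
  rw [List.getD_eq_getElem cs ' ' h]
  exact List.drop_eq_getElem_cons h

lemma innerA_eq (cs : List Char) (ci : Char) :
    ∀ fuel j, fuel = cs.length - j →
      innerA cs ci fuel j = mkInner ci ((cs.drop j).filter isDig) := by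
  intro fuel
  induction fuel with
  | zero =>
    intro j h
    have : cs.length ≤ j := by omega
    simp [innerA, List.drop_eq_nil_of_le this, mkInner]
  | succ n ih =>
    intro j h
    have hj : j < cs.length := by omega
    rw [drop_cons_getD cs j hj]
    by_cases hd : isDig (cs.getD j ' ')
    · rw [List.filter_cons_of_pos hd]
      simp only [innerA, mkInner, hd, if_true]
    · simp only [innerA, hd, if_false, List.filter_cons, Bool.false_eq_true]
      exact ih (j + 1) (by omega)

lemma outerA_eq (s : String) (cs : List Char) :
    ∀ fuel i res, fuel = (cs.length - 1) - i →
      outerA s cs fuel i res = pairScanB s ((cs.drop i).filter isDig) res := by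
  intro fuel
  induction fuel with
  | zero =>
    intro i res h
    -- drop i has at most one element, hence at most one digit: both sides give okMsg
    have hle : cs.length - 1 ≤ i := by omega
    have hlen : (cs.drop i).length ≤ 1 := by
      rw [List.length_drop]; omega
    have hfl : ((cs.drop i).filter isDig).length ≤ 1 :=
      le_trans (List.length_filter_le _ _) hlen
    simp only [outerA]
    match hm : (cs.drop i).filter isDig with
    | [] => simp [pairScanB]
    | [a] => simp [pairScanB]
    | a :: b :: rest => rw [hm] at hfl; simp at hfl
  | succ n ih =>
    intro i res h
    have hi : i < cs.length := by omega
    rw [drop_cons_getD cs i hi]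
    by_cases hd : isDig (cs.getD i ' ')
    · rw [List.filter_cons_of_pos hd]
      simp only [outerA, hd, if_true]
      rw [innerA_eq cs (cs.getD i ' ') (cs.length - (i + 1)) (i + 1) rfl]
      match hm : (cs.drop (i + 1)).filter isDig with
      | [] =>
        simp only [mkInner, pairScanB]
        rw [ih (i + 1) res (by omega), hm]
        simp [pairScanB]
      | b :: rest =>
        simp only [mkInner]
        by_cases hz : ((b.toNat : Int) - 48) + (((cs.getD i ' ').toNat : Int) - 48) == 0
        · simp only [hz, if_true]
          rw [ih (i + 1) (res ++ [String.ofList [cs.getD i ' ', b]]) (by omega), hm]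
          have hz' : ((((cs.getD i ' ').toNat : Int) - 48) + ((b.toNat : Int) - 48) == 0) = true := by
            rw [beq_iff_eq] at hz ⊢; omega
          simp only [pairScanB, hz', if_true]
        · simp only [hz]
          have hz' : ((((cs.getD i ' ').toNat : Int) - 48) + ((b.toNat : Int) - 48) == 0) = false := by
            rw [beq_eq_false_iff_ne]
            rw [beq_iff_eq] at hz
            omega
          simp only [pairScanB, hz', Bool.false_eq_true, if_false]
    · rw [List.filter_cons_of_neg hd]
      simp only [outerA, hd]
      exact ih (i + 1) res (by omega)

-- ===== VERDICT (by name: the statement is the Claim_ definition above) =====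
theorem exactly_spec : Claim_equal_exactly := by
  intro s _
  unfold Spec_exactly exactly exactly_alt
  simpa using outerA_eq s s.toList (s.toList.length - 1) 0 [] rfl
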